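-- pv_equiv track=rewrite | github.com/mintgyumin/joyner-place | evaluation/evaluator.py | rule_based_evaluation
-- ===== SOURCE A (Python) =====
-- def rule_based_evaluation(results: list[dict], expected: dict) -> dict:
--     """
--     추천 결과가 기본 품질 규칙을 만족하는지 체크리스트로 확인한다.
--
--     Args:
--         results  : 추천 장소 리스트 (place_name, address, place_url 등 포함)
--         expected : testset.json의 expected 항목 (min_results, max_results 등)
--
--     Returns:
--         각 규칙의 pass/fail 딕셔너리
--     """
--     checks = {}
--
--     n = len(results)
--     min_r = expected.get("min_results", 1)
--     max_r = expected.get("max_results", 5)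
--     checks["result_count_ok"] = min_r <= n <= max_r
--
--     place_names = [r.get("place_name", "") for r in results]
--     checks["no_duplicate"] = len(place_names) == len(set(place_names))
--
--     checks["all_have_address"] = all(
--         bool(r.get("address", "").strip()) for r in results
--     )
--
--     checks["all_have_url"] = all(
--         bool(r.get("place_url", "").strip()) for r in results
--     )
--
--     checks["all_have_reason"] = all(
--         bool(r.get("reason", "").strip()) for r in results
--     )
--
--     checks["overall_pass"] = all(checks.values())
--
--     return checks
-- ===== SOURCE B (Python) =====
-- def rule_based_evaluation(results: list[dict], expected: dict) -> dict:
--     """Single-pass checklist: one loop over results maintains a seen-set and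
--     three boolean flags instead of four separate passes."""
--     seen = set()
--     dup = False
--     all_addr = all_url = all_reason = True
--     for r in results:
--         name = r.get("place_name", "")
--         if name in seen:
--             dup = True
--         seen.add(name)
--         all_addr = all_addr and bool(r.get("address", "").strip())
--         all_url = all_url and bool(r.get("place_url", "").strip())
--         all_reason = all_reason and bool(r.get("reason", "").strip())
--     n = len(results)
--     count_ok = expected.get("min_results", 1) <= n <= expected.get("max_results", 5)
--     no_dup = not dup
--     overall = count_ok and no_dup and all_addr and all_url and all_reason
--     return {
--         "result_count_ok": count_ok,
--         "no_duplicate": no_dup,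
--         "all_have_address": all_addr,
--         "all_have_url": all_url,
--         "all_have_reason": all_reason,
--         "overall_pass": overall,
--     }
-- ===== Notes on version B (the rewrite author's own statement) =====
-- stated objective: alternative
-- what changed: The four separate passes over results (place_names list + set for duplicates, and three all(...) generators) are fused into one loop that maintains a seen-set and three boolean flags; the checks dict is built once at the end in the same key order.
import Mathlib
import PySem

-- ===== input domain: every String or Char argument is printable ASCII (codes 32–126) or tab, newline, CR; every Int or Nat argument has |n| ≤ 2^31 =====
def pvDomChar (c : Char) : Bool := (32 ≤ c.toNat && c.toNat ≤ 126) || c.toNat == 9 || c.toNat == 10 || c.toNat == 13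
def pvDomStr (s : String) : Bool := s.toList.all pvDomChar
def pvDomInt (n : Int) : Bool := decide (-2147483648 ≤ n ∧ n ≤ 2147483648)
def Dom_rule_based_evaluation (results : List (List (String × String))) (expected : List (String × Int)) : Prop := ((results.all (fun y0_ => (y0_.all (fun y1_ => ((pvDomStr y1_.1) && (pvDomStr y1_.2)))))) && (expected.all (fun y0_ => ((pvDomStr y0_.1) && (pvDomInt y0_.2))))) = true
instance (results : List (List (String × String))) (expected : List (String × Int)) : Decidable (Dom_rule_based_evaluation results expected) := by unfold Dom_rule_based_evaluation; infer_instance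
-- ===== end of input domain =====

-- B fuses A's four passes over `results` into one loop with a seen-set and three flags (objective: alternative decomposition, same cost).

-- ===== PORT A =====
-- bool(r.get(k, "").strip()) — the nonblank field test both Pythons write inline
def pvFieldOk (r : List (String × String)) (k : String) : Bool :=
  !(PySem.Str.strip (PySem.Dict.getD (PySem.Dict.mk r) k "") == "")

def rule_based_evaluation (results : List (List (String × String))) (expected : List (String × Int)) : List (String × Bool) :=
  let checks : PySem.Dict String Bool := PySem.Dict.empty
  let n : Int := (results.length : Int)
  let min_r : Int := PySem.Dict.getD (PySem.Dict.mk expected) "min_results" 1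
  let max_r : Int := PySem.Dict.getD (PySem.Dict.mk expected) "max_results" 5
  let checks := checks.insert "result_count_ok" (decide (min_r ≤ n ∧ n ≤ max_r))
  let place_names := results.map (fun r => PySem.Dict.getD (PySem.Dict.mk r) "place_name" "")
  let checks := checks.insert "no_duplicate" (place_names.length == PySem.Set.len (PySem.Set.ofList place_names))
  let checks := checks.insert "all_have_address" (results.all (fun r => pvFieldOk r "address"))
  let checks := checks.insert "all_have_url" (results.all (fun r => pvFieldOk r "place_url"))
  let checks := checks.insert "all_have_reason" (results.all (fun r => pvFieldOk r "reason"))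
  let checks := checks.insert "overall_pass" (checks.values.all (fun b => b))
  checks.items

-- ===== PORT B =====

-- one iteration of B's loop: state = (seen, dup, all_addr, all_url, all_reason)
def pvBStep (st : PySem.Set String × Bool × Bool × Bool × Bool) (r : List (String × String)) :
    PySem.Set String × Bool × Bool × Bool × Bool :=
  let name := PySem.Dict.getD (PySem.Dict.mk r) "place_name" ""
  (PySem.Set.add st.1 name,
   st.2.1 || PySem.Set.contains st.1 name,
   st.2.2.1 && pvFieldOk r "address",
   st.2.2.2.1 && pvFieldOk r "place_url",
   st.2.2.2.2 && pvFieldOk r "reason")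

def rule_based_evaluation_alt (results : List (List (String × String))) (expected : List (String × Int)) : List (String × Bool) :=
  let st := results.foldl pvBStep (PySem.Set.empty, false, true, true, true)
  let n : Int := (results.length : Int)
  let count_ok := decide (PySem.Dict.getD (PySem.Dict.mk expected) "min_results" 1 ≤ n ∧
                          n ≤ PySem.Dict.getD (PySem.Dict.mk expected) "max_results" 5)
  let no_dup := !st.2.1
  let overall := count_ok && no_dup && st.2.2.1 && st.2.2.2.1 && st.2.2.2.2
  [("result_count_ok", count_ok),
   ("no_duplicate", no_dup),
   ("all_have_address", st.2.2.1),
   ("all_have_url", st.2.2.2.1),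
   ("all_have_reason", st.2.2.2.2),
   ("overall_pass", overall)]

-- ===== PRECONDITION & SPEC =====
def Spec_rule_based_evaluation (results : List (List (String × String))) (expected : List (String × Int)) (out : List (String × Bool)) : Prop := out = rule_based_evaluation_alt results expected
instance (results : List (List (String × String))) (expected : List (String × Int)) (out : List (String × Bool)) : Decidable (Spec_rule_based_evaluation results expected out) := by unfold Spec_rule_based_evaluation; infer_instance

-- ===== CLAIM (what is proved, stated in full; the proofs are below) =====
def Claim_equal_rule_based_evaluation : Prop := ∀ (results : List (List (String × String))) (expected : List (String × Int)), Dom_rule_based_evaluation results expected → Spec_rule_based_evaluation results expected (rule_based_evaluation results expected)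

-- ===== LEMMAS AND PROOFS =====

theorem pv_len_add_contains (s : PySem.Set String) (x : String)
    (h : PySem.Set.contains s x = true) :
    PySem.Set.len (PySem.Set.add s x) = PySem.Set.len s := by
  simp only [PySem.Set.add, if_pos h]

theorem pv_len_add_not_contains (s : PySem.Set String) (x : String)
    (h : PySem.Set.contains s x = false) :
    PySem.Set.len (PySem.Set.add s x) = PySem.Set.len s + 1 := by
  rw [PySem.Set.add, if_neg (by simpa [PySem.Set.contains] using h)]
  simp [PySem.Set.len]

theorem pv_len_update_le (l : List String) (s : PySem.Set String) :
    PySem.Set.len (PySem.Set.update s l) ≤ PySem.Set.len s + l.length := by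
  induction l generalizing s with
  | nil => simp [PySem.Set.update]
  | cons x xs ih =>
    rw [PySem.Set.update_cons]
    calc PySem.Set.len (PySem.Set.update (PySem.Set.add s x) xs)
        ≤ PySem.Set.len (PySem.Set.add s x) + xs.length := ih _
      _ ≤ PySem.Set.len s + (x :: xs).length := by
          by_cases h : PySem.Set.contains s x = true
          · rw [pv_len_add_contains s x h]; simp only [List.length_cons]; push_cast; omega
          · rw [pv_len_add_not_contains s x (by simpa using h)]
            simp only [List.length_cons]; push_cast; omega

theorem pv_fold_spec (results : List (List (String × String)))
    (seen : PySem.Set String) (dup a u re : Bool) :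
    results.foldl pvBStep (seen, dup, a, u, re) =
      (PySem.Set.update seen (results.map (fun r => PySem.Dict.getD (PySem.Dict.mk r) "place_name" "")),
       dup || !(PySem.Set.len (PySem.Set.update seen (results.map (fun r => PySem.Dict.getD (PySem.Dict.mk r) "place_name" ""))) ==
                PySem.Set.len seen + (results.length : Int)),
       a && results.all (fun r => pvFieldOk r "address"),
       u && results.all (fun r => pvFieldOk r "place_url"),
       re && results.all (fun r => pvFieldOk r "reason")) := by
  induction results generalizing seen dup a u re with
  | nil => simp [PySem.Set.update]
  | cons r rest ih =>
    simp only [List.foldl_cons, pvBStep, ih, List.map_cons, PySem.Set.update_cons,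
      List.all_cons, List.length_cons, Bool.and_assoc]
    refine Prod.ext rfl (Prod.ext ?_ rfl)
    simp only [Bool.or_assoc]
    congr 1
    by_cases h : PySem.Set.contains seen (PySem.Dict.getD (PySem.Dict.mk r) "place_name" "") = true
    · have hadd : PySem.Set.add seen (PySem.Dict.getD (PySem.Dict.mk r) "place_name" "") = seen := by
        rw [PySem.Set.add, if_pos h]
      have hle := pv_len_update_le (rest.map (fun r => PySem.Dict.getD (PySem.Dict.mk r) "place_name" "")) seen
      simp only [List.length_map] at hle
      rw [hadd, h, Bool.true_or]
      symm
      simp only [Bool.not_eq_eq_eq_not, Bool.not_true, beq_eq_false_iff_ne, ne_eq]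
      push_cast
      omega
    · have h' : PySem.Set.contains seen (PySem.Dict.getD (PySem.Dict.mk r) "place_name" "") = false := by
        simpa using h
      rw [h', Bool.false_or,
        pv_len_add_not_contains seen (PySem.Dict.getD (PySem.Dict.mk r) "place_name" "") h']
      congr 2
      push_cast
      ring

theorem pv_update_nil (l : List String) :
    PySem.Set.update ([] : PySem.Set String) l = PySem.Set.ofList l := rfl

theorem rule_based_evaluation_eq (results : List (List (String × String))) (expected : List (String × Int)) :
    rule_based_evaluation results expected = rule_based_evaluation_alt results expected := by
  unfold rule_based_evaluation rule_based_evaluation_alt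
  rw [pv_fold_spec]
  simp [PySem.Dict.insert, PySem.Dict.contains, PySem.Dict.empty,
    PySem.Dict.values, pv_update_nil, PySem.Set.empty, Bool.and_assoc]
  constructor
  · exact eq_comm
  · rw [BEq.comm]

-- ===== VERDICT =====
theorem rule_based_evaluation_spec : Claim_equal_rule_based_evaluation := by
  intro results expected _
  unfold Spec_rule_based_evaluation
  exact rule_based_evaluation_eq results expected
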